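-- pv_equiv track=rewrite | github.com/TekMaTe-lux/Assistant-train | update_hafas_cache.py | extract_train_number_candidate
-- ===== SOURCE A (Python) =====
-- from typing import Dict, Iterable, List, Optional, Tuple
--
-- def extract_train_number_candidate(value: Optional[str]) -> Optional[str]:
--     if value is None:
--         return None
--     raw = str(value).strip()
--     if not raw:
--         return None
--     probes = []
--     if ":" in raw:
--         probes.append(raw.split(":", 1)[0])
--     probes.append(raw)
--     for probe in probes:
--         if not probe:
--             continue
--         match = _match_digits(probe, minimum=4)
--         if match:
--             return match
--     for probe in probes:
--         if not probe:
--             continue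
--         match = _match_digits(probe, minimum=3)
--         if match:
--             return match
--     return None
--
-- def _match_digits(text: str, minimum: int) -> Optional[str]:
--     digits = ""
--     for ch in text:
--         if ch.isdigit():
--             digits += ch
--             if len(digits) >= minimum:
--                 return digits
--         else:
--             digits = ""
--     return None
-- ===== SOURCE B (Python) =====
-- def _digit_runs(text):
--     # tokenize: blank out non-digits, then split into maximal digit groups
--     return "".join(ch if ch.isdigit() else " " for ch in text).split()
--
-- def extract_train_number_candidate(value):
--     if value is None:
--         return None
--     raw = str(value).strip()
--     if not raw:
--         return None
--     probes = ([raw.split(":", 1)[0]] if ":" in raw else []) + [raw]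
--     for minimum in (4, 3):
--         for probe in probes:
--             for run in _digit_runs(probe):
--                 if len(run) >= minimum:
--                     return run[:minimum]
--     return None
-- ===== Notes on version B (the rewrite author's own statement) =====
-- stated objective: alternative
-- what changed: Replaces A's interleaved accumulate-and-early-return character scan (with a reset-on-non-digit string accumulator, per threshold per probe) by a tokenize-then-scan decomposition: each probe is split once into its list of maximal digit runs and that list is scanned for the first run of sufficient length, truncated to the threshold.
import Mathlib
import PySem

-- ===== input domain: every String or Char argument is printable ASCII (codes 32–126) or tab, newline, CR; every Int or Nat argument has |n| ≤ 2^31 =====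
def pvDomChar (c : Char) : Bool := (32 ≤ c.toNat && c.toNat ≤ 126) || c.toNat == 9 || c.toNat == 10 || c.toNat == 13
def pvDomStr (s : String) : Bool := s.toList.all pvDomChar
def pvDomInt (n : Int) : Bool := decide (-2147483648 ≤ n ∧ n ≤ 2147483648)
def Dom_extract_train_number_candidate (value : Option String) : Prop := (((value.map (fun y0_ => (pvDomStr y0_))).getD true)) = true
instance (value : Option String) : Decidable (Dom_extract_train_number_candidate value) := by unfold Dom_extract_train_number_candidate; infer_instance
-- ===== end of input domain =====

-- ===== PORT A =====
-- B differs only in the digit-extraction strategy; the return-value equivalence below is exact.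

-- A's _match_digits: scan chars, accumulate a digit buffer, reset on non-digit,
-- early-return once the buffer reaches `minimum`.
def pvMatchDigitsGo (minimum : Nat) : List Char → List Char → Option (List Char)
  | [], _ => none
  | c :: cs, digits =>
    if PySem.Chars.isdigit c then
      let d := digits ++ [c]
      if minimum ≤ d.length then some d else pvMatchDigitsGo minimum cs d
    else pvMatchDigitsGo minimum cs []

def pvMatchDigits (text : List Char) (minimum : Nat) : Option (List Char) :=
  pvMatchDigitsGo minimum text []

-- one `for probe in probes:` loop of A (skip empty probe, return truthy match)
def pvFirstMatch (minimum : Nat) : List (List Char) → Option (List Char)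
  | [] => none
  | p :: ps =>
    if p = [] then pvFirstMatch minimum ps
    else
      match pvMatchDigits p minimum with
      | some m => if m = [] then pvFirstMatch minimum ps else some m
      | none => pvFirstMatch minimum ps

def extract_train_number_candidate (value : Option String) : Option String :=
  match value with
  | none => none
  | some v =>
    let raw := PySem.Chars.strip v.toList
    if raw = [] then none
    else
      let probes := (if PySem.Chars.isIn [':'] raw then
          [(PySem.Chars.splitOnMax raw [':'] 1).headD []] else []) ++ [raw]
      match pvFirstMatch 4 probes with
      | some m => some (String.ofList m)
      | none =>
        match pvFirstMatch 3 probes with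
        | some m => some (String.ofList m)
        | none => none

-- ===== PORT B =====
-- B's _digit_runs: blank out non-digits, then str.split() into maximal digit groups
def pvDigitRuns (text : List Char) : List (List Char) :=
  PySem.Chars.split₀ (text.map (fun ch => if PySem.Chars.isdigit ch then ch else ' '))

-- `for run in _digit_runs(probe): if len(run) >= minimum: return run[:minimum]`
def pvScanRuns (minimum : Nat) : List (List Char) → Option (List Char)
  | [] => none
  | r :: rs => if minimum ≤ r.length then some (r.take minimum) else pvScanRuns minimum rs

def pvScanProbes (minimum : Nat) : List (List Char) → Option (List Char)
  | [] => none
  | p :: ps =>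
    match pvScanRuns minimum (pvDigitRuns p) with
    | some m => some m
    | none => pvScanProbes minimum ps

-- `for minimum in (4, 3):`
def pvScanMins (probes : List (List Char)) : List Nat → Option (List Char)
  | [] => none
  | m :: ms =>
    match pvScanProbes m probes with
    | some r => some r
    | none => pvScanMins probes ms

def extract_train_number_candidate_alt (value : Option String) : Option String :=
  match value with
  | none => none
  | some v =>
    let raw := PySem.Chars.strip v.toList
    if raw = [] then none
    else
      let probes := (if PySem.Chars.isIn [':'] raw then
          [(PySem.Chars.splitOnMax raw [':'] 1).headD []] else []) ++ [raw]
      (pvScanMins probes [4, 3]).map String.ofList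

-- ===== PRECONDITION & SPEC =====
def Spec_extract_train_number_candidate (value : Option String) (out : Option String) : Prop := out = extract_train_number_candidate_alt value
instance (value : Option String) (out : Option String) : Decidable (Spec_extract_train_number_candidate value out) := by unfold Spec_extract_train_number_candidate; infer_instance

-- ===== CLAIM (what is proved, stated in full; the proofs are below) =====
def Claim_equal_extract_train_number_candidate : Prop := ∀ (value : Option String), Dom_extract_train_number_candidate value → Spec_extract_train_number_candidate value (extract_train_number_candidate value)

-- ===== LEMMAS AND PROOFS =====

theorem isspace_of_isdigit (c : Char) (h : PySem.Chars.isdigit c = true) :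
    PySem.Chars.isspace c = false := by
  simp only [PySem.Chars.isdigit, Bool.and_eq_true, decide_eq_true_eq, Char.le_def] at h
  have h1 : 48 ≤ c.toNat := h.1
  have h2 : c.toNat ≤ 57 := h.2
  simp only [PySem.Chars.isspace, Bool.or_eq_false_iff, Bool.and_eq_false_iff,
    decide_eq_false_iff_not]
  omega

theorem go_append (rest cur : List Char) (acc : List (List Char)) :
    PySem.Chars.split₀.go rest cur acc =
      acc.reverse ++ PySem.Chars.split₀.go rest cur [] := by
  induction rest generalizing cur acc with
  | nil => simp [PySem.Chars.split₀.go]; split <;> simp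
  | cons c cs ih =>
    simp only [PySem.Chars.split₀.go]
    split
    · split
      · exact ih _ _
      · rw [ih [] (cur.reverse :: acc), ih [] [cur.reverse]]; simp
    · exact ih _ _

theorem scan_small_append (minimum : Nat) (l l' : List (List Char))
    (h : ∀ r ∈ l, r.length < minimum) :
    pvScanRuns minimum (l ++ l') = pvScanRuns minimum l' := by
  induction l with
  | nil => simp
  | cons r rs ih =>
    have hr := h r (by simp)
    simp only [List.cons_append, pvScanRuns]
    rw [if_neg (by omega)]
    exact ih (fun x hx => h x (by simp [hx]))

theorem scan_full (minimum : Nat) (rest cur : List Char)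
    (h1 : 1 ≤ minimum) (h2 : minimum ≤ cur.length) :
    pvScanRuns minimum (PySem.Chars.split₀.go rest cur []) =
      some (cur.reverse.take minimum) := by
  induction rest generalizing cur with
  | nil =>
    have hcur : cur.isEmpty = false := by
      cases cur with
      | nil => simp at h2; omega
      | cons a l => simp
    simp [PySem.Chars.split₀.go, hcur, pvScanRuns, h2]
  | cons c cs ih =>
    simp only [PySem.Chars.split₀.go]
    split
    · have hcur : cur.isEmpty = false := by
        cases cur with
        | nil => simp at h2; omega
        | cons a l => simp
      rw [if_neg (by simp [hcur]), go_append]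
      simp only [List.reverse_cons, List.reverse_nil, List.nil_append]
      simp [pvScanRuns, h2]
    · rw [ih (c :: cur) (by simpa using Nat.le_succ_of_le h2)]
      simp only [List.reverse_cons]
      rw [List.take_append_of_le_length (by simpa using h2)]

theorem main_go (minimum : Nat) (text digits : List Char) (acc : List (List Char))
    (hacc : ∀ r ∈ acc, r.length < minimum) (hd : digits.length < minimum) :
    pvMatchDigitsGo minimum text digits =
      pvScanRuns minimum
        (PySem.Chars.split₀.go
          (text.map (fun ch => if PySem.Chars.isdigit ch then ch else ' '))
          digits.reverse acc) := by
  have hmin1 : 1 ≤ minimum := by omega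
  induction text generalizing digits acc with
  | nil =>
    have haccr : ∀ r ∈ acc.reverse, r.length < minimum :=
      fun r hr => hacc r (List.mem_reverse.mp hr)
    simp only [pvMatchDigitsGo, List.map_nil, PySem.Chars.split₀.go]
    split
    · rw [← List.append_nil acc.reverse, scan_small_append minimum _ _ haccr]
      simp [pvScanRuns]
    · rw [List.reverse_cons, scan_small_append minimum _ _ haccr]
      simp only [List.reverse_reverse, pvScanRuns]
      rw [if_neg (by omega)]
  | cons c cs ih =>
    have haccr : ∀ r ∈ acc.reverse, r.length < minimum :=
      fun r hr => hacc r (List.mem_reverse.mp hr)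
    simp only [pvMatchDigitsGo, List.map_cons]
    by_cases hc : PySem.Chars.isdigit c = true
    · have hspc : ¬ (PySem.Chars.isspace c = true) := by
        simp [isspace_of_isdigit c hc]
      rw [if_pos hc, if_pos hc]
      simp only [PySem.Chars.split₀.go]
      by_cases hlen : minimum ≤ (digits ++ [c]).length
      · have hlen' : minimum ≤ digits.length + 1 := by simpa using hlen
        rw [if_pos hlen, if_neg hspc, go_append, scan_small_append minimum _ _ haccr]
        rw [scan_full minimum _ (c :: digits.reverse) hmin1 (by simp; omega)]
        rw [show (c :: digits.reverse).reverse = digits ++ [c] by simp]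
        rw [List.take_of_length_le (by simp; omega)]
      · have hlen' : digits.length + 1 < minimum := by
          simp at hlen; omega
        rw [if_neg hlen, if_neg hspc]
        have := ih (digits ++ [c]) acc hacc (by simp; omega)
        simpa using this
    · rw [if_neg hc, if_neg hc]
      have hsp : PySem.Chars.isspace ' ' = true := by decide
      simp only [PySem.Chars.split₀.go]
      rw [if_pos hsp]
      by_cases hemp : digits.reverse.isEmpty = true
      · rw [if_pos hemp]
        exact ih [] acc hacc (by simpa using hmin1)
      · rw [if_neg hemp]
        have := ih [] (digits.reverse.reverse :: acc)
          (by intro r hr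
              simp only [List.mem_cons] at hr
              rcases hr with hr | hr
              · simp [hr, hd]
              · exact hacc r hr)
          (by simpa using hmin1)
        simpa using this

theorem match_eq (text : List Char) (minimum : Nat) (h : 1 ≤ minimum) :
    pvMatchDigits text minimum = pvScanRuns minimum (pvDigitRuns text) := by
  unfold pvMatchDigits pvDigitRuns PySem.Chars.split₀
  exact main_go minimum text [] [] (by simp) (by simpa using h)

theorem scan_ne_nil (minimum : Nat) (l : List (List Char)) (m : List Char)
    (h1 : 1 ≤ minimum) (h : pvScanRuns minimum l = some m) : m ≠ [] := by
  induction l with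
  | nil => simp [pvScanRuns] at h
  | cons r rs ih =>
    simp only [pvScanRuns] at h
    split at h
    · rename_i hr
      cases h
      intro hnil
      have : (r.take minimum).length = 0 := by rw [hnil]; simp
      simp [Nat.min_eq_left hr] at this
      omega
    · exact ih h

theorem runs_nil : pvDigitRuns [] = [] := by decide

theorem probes_eq (minimum : Nat) (probes : List (List Char)) (h : 1 ≤ minimum) :
    pvFirstMatch minimum probes = pvScanProbes minimum probes := by
  induction probes with
  | nil => rfl
  | cons p ps ih =>
    simp only [pvFirstMatch, pvScanProbes]
    by_cases hp : p = []
    · rw [if_pos hp, hp, runs_nil]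
      simpa [pvScanRuns] using ih
    · rw [if_neg hp, match_eq p minimum h]
      cases hscan : pvScanRuns minimum (pvDigitRuns p) with
      | none => exact ih
      | some m =>
        have hm := scan_ne_nil minimum _ m h hscan
        simp [hm]

-- ===== VERDICT (by name: the statement is the Claim_ definition above) =====
theorem extract_train_number_candidate_spec : Claim_equal_extract_train_number_candidate := by
  intro value _
  unfold Spec_extract_train_number_candidate
  unfold extract_train_number_candidate extract_train_number_candidate_alt
  cases value with
  | none => rfl
  | some v =>
    simp only
    split
    · rfl
    · simp only [pvScanMins, probes_eq 4 _ (by omega), probes_eq 3 _ (by omega)]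
      cases pvScanProbes 4 _ with
      | some m => rfl
      | none =>
        cases pvScanProbes 3 _ with
        | some m => rfl
        | none => rfl
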